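-- pv_equiv track=rewrite | github.com/HeeSang1996/CompilerTermProject | Code/defForString.py | is_string
-- ===== SOURCE A (Python) =====
-- ZERO = ['0']
--
-- NON_ZERO = ['1', '2', '3', '4', '5', '6', '7', '8', '9']
--
-- LETTER = ['A', 'B', 'C', 'D', 'E', 'F', 'G', 'H', 'I', 'J', 'K', 'L', 'M', 'N', 'O', 'P', 'Q,' 'R', 'S', 'T', 'U', 'V', 'W', 'X', 'Y', 'Z', \
--     'a', 'b', 'c', 'd', 'e', 'f', 'g', 'h', 'i', 'j', 'k', 'l', 'm', 'n', 'o', 'p', 'q', 'r', 's', 't', 'u', 'v', 'w', 'x', 'y', 'z']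
--
-- def is_string(token):
--     i = 0; j = 0
--     final = [2]
--     transition_table = [[1, -1, -1, -1, -1], [2, 3, 4, 5, 6], [-1, -1, -1, -1, -1],\
--     [2, 3, 4, 5, 6], [2, 3, 4, 5, 6], [2, 3, 4, 5, 6], [2, 3, 4, 5, 6]]
--
--     # Analyze
--     for c in token:
--         if c in '"': j = 0
--         elif c in LETTER: j = 1
--         elif c in ZERO: j = 2
--         elif c in NON_ZERO: j = 3
--         elif c in [' ']: j = 4
--         else:
--             return False
--
--         i = transition_table[i][j]
--
--         if i == -1:
--             return False
--
--     if i in final: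
--         return True
--     else:
--         return False
-- ===== SOURCE B (Python) =====
-- ZERO = ['0']
--
-- NON_ZERO = ['1', '2', '3', '4', '5', '6', '7', '8', '9']
--
-- LETTER = ['A', 'B', 'C', 'D', 'E', 'F', 'G', 'H', 'I', 'J', 'K', 'L', 'M', 'N', 'O', 'P', 'Q,' 'R', 'S', 'T', 'U', 'V', 'W', 'X', 'Y', 'Z', \
--     'a', 'b', 'c', 'd', 'e', 'f', 'g', 'h', 'i', 'j', 'k', 'l', 'm', 'n', 'o', 'p', 'q', 'r', 's', 't', 'u', 'v', 'w', 'x', 'y', 'z']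
--
-- BODY = set(LETTER + ZERO + NON_ZERO + [' '])
--
-- def is_string(token):
--     if len(token) < 2 or token[0] != '"' or token[-1] != '"':
--         return False
--     for c in token[1:-1]:
--         if c not in BODY:
--             return False
--     return True
-- ===== Notes on version B (the rewrite author's own statement) =====
-- stated objective: simpler
-- what changed: Replaced the DFA with state variable and transition table by a direct structural check: first and last character must be '"' (with length >= 2) and every body character must belong to one precomputed allowed set (built from the module's original LETTER/ZERO/NON_ZERO lists, reused verbatim).
import Mathlib
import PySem

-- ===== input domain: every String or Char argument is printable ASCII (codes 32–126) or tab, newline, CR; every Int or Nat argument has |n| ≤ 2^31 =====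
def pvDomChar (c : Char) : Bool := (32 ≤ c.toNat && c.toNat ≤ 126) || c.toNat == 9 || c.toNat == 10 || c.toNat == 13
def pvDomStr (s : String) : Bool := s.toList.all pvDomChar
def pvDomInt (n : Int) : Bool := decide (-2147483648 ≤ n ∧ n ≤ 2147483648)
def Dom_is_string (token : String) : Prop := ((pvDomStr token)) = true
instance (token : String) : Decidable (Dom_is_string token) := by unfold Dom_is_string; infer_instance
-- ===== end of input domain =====

-- B replaces A's DFA transition table with a direct structural check (first/last char = '"',
-- body chars drawn from one membership set); objective: simpler. Both reuse the module's
-- LETTER list verbatim (including its 'Q,' 'R' concatenation quirk).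

-- ===== PORT A =====
def pvZERO : List String := ["0"]
def pvNONZERO : List String := ["1", "2", "3", "4", "5", "6", "7", "8", "9"]
-- "Q," "R" are adjacent literals in the Python source, concatenating to the single element "Q,R"
def pvLETTER : List String :=
  ["A", "B", "C", "D", "E", "F", "G", "H", "I", "J", "K", "L", "M", "N", "O", "P", "Q,R",
   "S", "T", "U", "V", "W", "X", "Y", "Z",
   "a", "b", "c", "d", "e", "f", "g", "h", "i", "j", "k", "l", "m", "n", "o", "p", "q",
   "r", "s", "t", "u", "v", "w", "x", "y", "z"]

def pvTable : List (List Int) :=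
  [[1, -1, -1, -1, -1], [2, 3, 4, 5, 6], [-1, -1, -1, -1, -1],
   [2, 3, 4, 5, 6], [2, 3, 4, 5, 6], [2, 3, 4, 5, 6], [2, 3, 4, 5, 6]]

-- the if/elif chain computing j; `c in '"'` is membership of a 1-char string in a 1-char
-- string, i.e. exactly c = '"'; `none` = the else branch's `return False`
def pvClassify (c : Char) : Option Int :=
  if c = '"' then some 0
  else if String.ofList [c] ∈ pvLETTER then some 1
  else if String.ofList [c] ∈ pvZERO then some 2
  else if String.ofList [c] ∈ pvNONZERO then some 3
  else if String.ofList [c] ∈ ([" "] : List String) then some 4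
  else none

-- transition_table[i][j]; defaults are totality guards only (i is always 0..6, j always 0..4)
def pvStep (i j : Int) : Int := PySem.List.pyGetD (PySem.List.pyGetD pvTable i []) j (-1)

def pvLoop : List Char → Int → Bool
  | [], i => decide (i ∈ ([2] : List Int))
  | c :: rest, i =>
    match pvClassify c with
    | none => false
    | some j =>
      let i' := pvStep i j
      if i' = -1 then false else pvLoop rest i'

def is_string (token : String) : Bool := pvLoop token.toList 0

-- ===== PORT B =====
def pvBODY : PySem.Set String :=
  PySem.Set.ofList (pvLETTER ++ pvZERO ++ pvNONZERO ++ [" "])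

def is_string_alt (token : String) : Bool :=
  let cs := token.toList
  if cs.length < 2 then false
  else if PySem.List.pyGet? cs 0 ≠ some '"' then false
  else if PySem.List.pyGet? cs (-1) ≠ some '"' then false
  else (PySem.List.slice cs (some 1) (some (-1))).all
         (fun c => PySem.Set.contains pvBODY (String.ofList [c]))

-- ===== PRECONDITION & SPEC =====
def Spec_is_string (token : String) (out : Bool) : Prop := out = is_string_alt token
instance (token : String) (out : Bool) : Decidable (Spec_is_string token out) := by unfold Spec_is_string; infer_instance

-- ===== CLAIM (what is proved, stated in full; the proofs are below) =====
def Claim_equal_is_string : Prop := ∀ (token : String), Dom_is_string token → Spec_is_string token (is_string token)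

-- ===== LEMMAS AND PROOFS =====

set_option maxRecDepth 8192

-- B's body test, on one character
def bodyOKb (c : Char) : Bool := PySem.Set.contains pvBODY (String.ofList [c])

-- "the remaining input is a valid body followed by a single closing quote"
def endQ : List Char → Bool
  | [] => false
  | [c] => decide (c = '"')
  | c :: rest => bodyOKb c && endQ rest

theorem bodyOKb_iff (c : Char) : bodyOKb c = true ↔
    (String.ofList [c] ∈ pvLETTER ∨ String.ofList [c] ∈ pvZERO ∨
     String.ofList [c] ∈ pvNONZERO ∨ String.ofList [c] ∈ ([" "] : List String)) := by
  rw [bodyOKb, pvBODY, PySem.Set.contains_iff, PySem.Set.mem_ofList]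
  simp [List.mem_append]

theorem pvLoop_two (cs : List Char) : pvLoop cs 2 = decide (cs = []) := by
  cases cs with
  | nil => decide
  | cons c rest =>
    show (match pvClassify c with
          | none => false
          | some j => if pvStep 2 j = -1 then false else pvLoop rest (pvStep 2 j)) = _
    unfold pvClassify
    split_ifs <;>
      simp [show pvStep 2 0 = -1 from by decide, show pvStep 2 1 = -1 from by decide,
            show pvStep 2 2 = -1 from by decide, show pvStep 2 3 = -1 from by decide,
            show pvStep 2 4 = -1 from by decide]

theorem endQ_nil : endQ [] = false := rfl
theorem endQ_single (c : Char) : endQ [c] = decide (c = '"') := rfl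
theorem endQ_cons2 (c c2 : Char) (r : List Char) :
    endQ (c :: c2 :: r) = (bodyOKb c && endQ (c2 :: r)) := rfl

theorem pvStep_row (s : Int) (hs : s = 3 ∨ s = 4 ∨ s = 5 ∨ s = 6) (j : Int) :
    pvStep s j = pvStep 1 j := by
  rcases hs with h | h | h | h <;> subst h <;> rfl

theorem pvLoop_row (cs : List Char) (s : Int) (hs : s = 3 ∨ s = 4 ∨ s = 5 ∨ s = 6) :
    pvLoop cs s = pvLoop cs 1 := by
  cases cs with
  | nil => rcases hs with h | h | h | h <;> subst h <;> decide
  | cons c rest =>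
    show (match pvClassify c with
          | none => false
          | some j => if pvStep s j = -1 then false else pvLoop rest (pvStep s j)) = _
    cases hc : pvClassify c with
    | none => simp [pvLoop, hc]
    | some j => simp [pvLoop, hc, pvStep_row s hs j]

theorem pvLoop_one (cs : List Char) : pvLoop cs 1 = endQ cs := by
  induction cs with
  | nil => decide
  | cons c rest ih =>
    show (match pvClassify c with
          | none => false
          | some j => if pvStep 1 j = -1 then false else pvLoop rest (pvStep 1 j)) = _
    unfold pvClassify
    split_ifs with h1 h2 h3 h4 h5
    · -- c = '"'
      subst h1
      show (if pvStep 1 0 = -1 then false else pvLoop rest (pvStep 1 0)) = _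
      rw [show pvStep 1 0 = 2 from by decide]
      norm_num [pvLoop_two]
      cases rest with
      | nil => simp [endQ_single]
      | cons c2 r => simp [endQ_cons2, show bodyOKb '"' = false from by decide]
    · -- letter
      show (if pvStep 1 1 = -1 then false else pvLoop rest (pvStep 1 1)) = _
      rw [show pvStep 1 1 = 3 from by decide]
      norm_num [pvLoop_row rest 3 (by norm_num), ih]
      cases rest with
      | nil => simp [endQ_nil, endQ_single, h1]
      | cons c2 r => simp [endQ_cons2, (bodyOKb_iff c).mpr (Or.inl h2)]
    · -- zero
      show (if pvStep 1 2 = -1 then false else pvLoop rest (pvStep 1 2)) = _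
      rw [show pvStep 1 2 = 4 from by decide]
      norm_num [pvLoop_row rest 4 (by norm_num), ih]
      cases rest with
      | nil => simp [endQ_nil, endQ_single, h1]
      | cons c2 r => simp [endQ_cons2, (bodyOKb_iff c).mpr (Or.inr (Or.inl h3))]
    · -- non-zero
      show (if pvStep 1 3 = -1 then false else pvLoop rest (pvStep 1 3)) = _
      rw [show pvStep 1 3 = 5 from by decide]
      norm_num [pvLoop_row rest 5 (by norm_num), ih]
      cases rest with
      | nil => simp [endQ_nil, endQ_single, h1]
      | cons c2 r => simp [endQ_cons2, (bodyOKb_iff c).mpr (Or.inr (Or.inr (Or.inl h4)))]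
    · -- space
      show (if pvStep 1 4 = -1 then false else pvLoop rest (pvStep 1 4)) = _
      rw [show pvStep 1 4 = 6 from by decide]
      norm_num [pvLoop_row rest 6 (by norm_num), ih]
      cases rest with
      | nil => simp [endQ_nil, endQ_single, h1]
      | cons c2 r => simp [endQ_cons2, (bodyOKb_iff c).mpr (Or.inr (Or.inr (Or.inr h5)))]
    · -- invalid character
      have hb : bodyOKb c = false := by
        rw [Bool.eq_false_iff]
        intro h
        rcases (bodyOKb_iff c).mp h with h' | h' | h' | h' <;> tauto
      cases rest with
      | nil => simp [endQ_single, h1]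
      | cons c2 r => simp [endQ_cons2, hb]

theorem endQ_eq (rest : List Char) (h : rest ≠ []) :
    endQ rest = (decide (rest.getLast? = some '"') && rest.dropLast.all bodyOKb) := by
  induction rest with
  | nil => simp at h
  | cons c r ih =>
    cases r with
    | nil => simp [endQ_single]
    | cons c2 r2 =>
      rw [endQ_cons2, ih (by simp)]
      simp [List.getLast?_cons_cons, List.dropLast_cons_of_ne_nil, Bool.and_left_comm]

theorem slice_one_neg_one (c : Char) (rest : List Char) :
    PySem.List.slice (c :: rest) (some 1) (some (-1)) = rest.dropLast := by
  cases rest with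
  | nil => simp [PySem.List.slice, PySem.List.clampIdx]
  | cons c2 r =>
    simp [PySem.List.slice, PySem.List.clampIdx]
    rw [if_neg (by omega), List.dropLast_eq_take]
    simp

-- ===== VERDICT (by name: the statement is the Claim_ definition above) =====
theorem is_string_spec : Claim_equal_is_string := by
  intro token _
  unfold Spec_is_string is_string is_string_alt
  cases hcs : token.toList with
  | nil => simp [pvLoop]
  | cons c rest =>
    by_cases hq : c = '"'
    · subst hq
      rw [show pvLoop ('"' :: rest) 0 =
            (if pvStep 0 0 = -1 then false else pvLoop rest (pvStep 0 0)) from by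
              simp [pvLoop, pvClassify],
          show pvStep 0 0 = 1 from by decide]
      norm_num [pvLoop_one]
      cases rest with
      | nil => simp [endQ_nil]
      | cons c2 r =>
        rw [endQ_eq (c2 :: r) (by simp)]
        by_cases hl : (c2 :: r).getLast? = some '"'
        · simp [PySem.List.pyGet?_neg_one, slice_one_neg_one, List.getLast?_cons_cons, hl]
          congr 1
          funext x
          simp [bodyOKb]
        · simp [PySem.List.pyGet?_neg_one, List.getLast?_cons_cons, hl]
    · have hA : pvLoop (c :: rest) 0 = false := by
        show (match pvClassify c with
              | none => false
              | some j => if pvStep 0 j = -1 then false else pvLoop rest (pvStep 0 j)) = false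
        unfold pvClassify
        split_ifs <;> first
          | (exact absurd ‹c = '"'› hq)
          | rfl
      rw [hA]
      cases rest with
      | nil => simp
      | cons c2 r => simp [PySem.List.pyGet?_zero, hq]
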